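-- pv_equiv track=rewrite | github.com/carl12/InterviewAlgorithmProblems | numPaths.py | num_of_paths_to_dest2
-- ===== SOURCE A (Python) =====
-- def num_of_paths_to_dest2(n):
--   if n < 0: raise ValueError('Square cannot have negative size')
--   if n < 3: return 1
--   num_paths_to = [[0 for _ in range(n)] for _ in range(n)]
--   num_paths_to[0][0] = 1
--   for i in range(1,n):
--     for j in range(i+1):
--       num_sol = 0
--       left = 0
--       down = 0
--       if i > 0:
--         left = num_paths_to[i-1][j]
--       if j > 0:
--         down = num_paths_to[i][j-1]
--       num_paths_to[i][j] = left + down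
--
--   return num_paths_to[n-1][n-1]
-- ===== SOURCE B (Python) =====
-- def num_of_paths_to_dest2(n):
--   if n < 0: raise ValueError('Square cannot have negative size')
--   if n == 0: return 1
--   m = n - 1
--   c = 1
--   for k in range(1, m + 1):
--     c = c * (m + k) // k   # c == comb(m + k, k); each division is exact
--   return c // n            # Catalan number C_m = comb(2m, m) // (m + 1)
-- ===== Notes on version B (the rewrite author's own statement) =====
-- stated objective: faster
-- what changed: Replaces the O(n^2) dynamic-programming table of lattice-path counts by the closed-form Catalan number C_{n-1} = binom(2(n-1), n-1) // n, computing the binomial with a single O(n) product loop.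
import Mathlib
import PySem

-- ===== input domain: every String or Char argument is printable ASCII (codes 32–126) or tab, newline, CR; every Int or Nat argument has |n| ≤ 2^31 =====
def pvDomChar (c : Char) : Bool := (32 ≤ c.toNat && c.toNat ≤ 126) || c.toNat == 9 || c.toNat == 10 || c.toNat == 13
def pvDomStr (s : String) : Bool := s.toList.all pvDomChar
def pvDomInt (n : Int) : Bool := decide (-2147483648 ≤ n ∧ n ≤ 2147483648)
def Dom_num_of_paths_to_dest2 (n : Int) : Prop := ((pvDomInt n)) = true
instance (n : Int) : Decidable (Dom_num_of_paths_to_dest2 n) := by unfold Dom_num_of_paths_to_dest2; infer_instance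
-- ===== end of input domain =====

-- B replaces A's O(n^2) dynamic-programming table by the closed-form Catalan number
-- C_{n-1} = binom(2(n-1), n-1) // n, the binomial computed by a single O(n) product loop.

-- ===== PORT A =====
-- num_paths_to[i][j]; indices are always in range in A, so the total pyGetD form is exact
def pvMGet (m : List (List Int)) (i j : Int) : Int :=
  PySem.List.pyGetD (PySem.List.pyGetD m i []) j 0

-- num_paths_to[i][j] = v; in-range assignment, so the total pySetD form is exact
def pvMSet (m : List (List Int)) (i j : Int) (v : Int) : List (List Int) :=
  PySem.List.pySetD m i (PySem.List.pySetD (PySem.List.pyGetD m i []) j v)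

def num_of_paths_to_dest2 (n : Int) : Int :=
  if n < 0 then 0  -- Python raises ValueError here; excluded by Pre_
  else if n < 3 then 1
  else
    let init : List (List Int) :=
      (PySem.List.pyRange 0 n 1).map (fun _ => (PySem.List.pyRange 0 n 1).map (fun _ => (0 : Int)))
    let m0 := pvMSet init 0 0 1
    let mf := (PySem.List.pyRange 1 n 1).foldl (fun m i =>
        (PySem.List.pyRange 0 (i + 1) 1).foldl (fun m j =>
          let left := if i > 0 then pvMGet m (i - 1) j else 0
          let down := if j > 0 then pvMGet m i (j - 1) else 0
          pvMSet m i j (left + down)) m) m0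
    pvMGet mf (n - 1) (n - 1)

-- ===== PORT B =====
def num_of_paths_to_dest2_alt (n : Int) : Int :=
  if n < 0 then 0  -- Python raises ValueError here; excluded by Pre_
  else if n = 0 then 1
  else
    let m := n - 1
    let c := (PySem.List.pyRange 1 (m + 1) 1).foldl
      (fun c k => PySem.Int.floordiv (c * (m + k)) k) 1
    PySem.Int.floordiv c n

-- ===== PRECONDITION & SPEC =====
-- Pre_ excludes exactly n < 0, where the Python A raises ValueError.
def Pre_num_of_paths_to_dest2 (n : Int) : Prop := 0 ≤ n
instance (n : Int) : Decidable (Pre_num_of_paths_to_dest2 n) := by unfold Pre_num_of_paths_to_dest2; infer_instance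
def pvWitness_num_of_paths_to_dest2 : Int := 4

def Spec_num_of_paths_to_dest2 (n : Int) (out : Int) : Prop := out = num_of_paths_to_dest2_alt n
instance (n : Int) (out : Int) : Decidable (Spec_num_of_paths_to_dest2 n out) := by unfold Spec_num_of_paths_to_dest2; infer_instance

-- ===== CLAIM (what is proved, stated in full; the proofs are below) =====
def Claim_equal_num_of_paths_to_dest2 : Prop := ∀ (n : Int), Dom_num_of_paths_to_dest2 n → Pre_num_of_paths_to_dest2 n → Spec_num_of_paths_to_dest2 n (num_of_paths_to_dest2 n)

-- ===== LEMMAS AND PROOFS =====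

-- The DP table's intended content: pvB i j = A's num_paths_to[i][j] (0 strictly above the diagonal).
def pvB : Nat → Nat → Nat
  | 0, 0 => 1
  | 0, _ + 1 => 0
  | i + 1, 0 => pvB i 0
  | i + 1, j + 1 => if j + 1 ≤ i + 1 then pvB i (j + 1) + pvB (i + 1) j else 0

theorem pvB_gt {i j : Nat} (h : i < j) : pvB i j = 0 := by
  match i, j, h with
  | 0, _ + 1, _ => rw [pvB]
  | i + 1, j + 1, h => rw [pvB]; simp; omega

theorem pvB_zero (c : Nat) : pvB 0 c = if c = 0 then 1 else 0 := by
  match c with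
  | 0 => rw [pvB]; rfl
  | _ + 1 => rw [pvB]; rfl

-- Reflection closed form for the ballot numbers in the table.
theorem pvB_closed : ∀ i j : Nat, j ≤ i + 1 →
    (pvB i j : ℤ) = Nat.choose (i + j) j - Nat.choose (i + j) (i + 1) := by
  intro i
  induction i with
  | zero =>
    intro j hj
    interval_cases j <;> simp [pvB]
  | succ i ih =>
    intro j
    induction j with
    | zero =>
      intro _
      have h0 := ih 0 (by omega)
      rw [show pvB (i+1) 0 = pvB i 0 from by rw [pvB]]
      simp at h0 ⊢
      omega
    | succ j ihj =>
      intro hj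
      by_cases hle : j + 1 ≤ i + 1
      · rw [pvB, if_pos hle]
        have h1 := ih (j+1) (by omega)
        have h2 := ihj (by omega)
        have p1 : Nat.choose (i+1+(j+1)) (j+1) = Nat.choose (i+j+1) j + Nat.choose (i+j+1) (j+1) := by
          rw [show i+1+(j+1) = (i+j+1)+1 by omega]; exact Nat.choose_succ_succ _ _
        have p2 : Nat.choose (i+1+(j+1)) (i+1+1) = Nat.choose (i+j+1) (i+1) + Nat.choose (i+j+1) (i+1+1) := by
          rw [show i+1+(j+1) = (i+j+1)+1 by omega]; exact Nat.choose_succ_succ _ _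
        rw [show i+(j+1) = i+j+1 by omega] at h1
        rw [show i+1+j = i+j+1 by omega] at h2
        push_cast [p1, p2]
        linarith
      · have hj2 : j + 1 = i + 2 := by omega
        rw [pvB, if_neg hle, hj2]
        simp

-- ----- matrix plumbing -----

def pvEntry (M : List (List Int)) (r c : Nat) : Int := (M.getD r []).getD c 0

theorem getD_set_rows (M : List (List Int)) (i : Nat) (row : List Int) (r : Nat) :
    (M.set i row).getD r [] = if i = r ∧ i < M.length then row else M.getD r [] := by
  simp [List.getD_eq_getElem?_getD, List.getElem?_set]
  split_ifs with h h2 <;> simp_all <;> omega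

theorem getD_set_cols (L : List Int) (t : Nat) (v : Int) (c : Nat) :
    (L.set t v).getD c 0 = if t = c ∧ t < L.length then v else L.getD c 0 := by
  simp [List.getD_eq_getElem?_getD, List.getElem?_set]
  split_ifs with h h2 <;> simp_all <;> omega

theorem pvMGet_natCast (M : List (List Int)) (r c : Nat) :
    pvMGet M (r : Int) (c : Int) = pvEntry M r c := by
  simp [pvMGet, pvEntry]

theorem pvEntry_pvMSet (M : List (List Int)) (i t : Nat) (hi : i < M.length) (v : Int)
    (ht : t < (M.getD i []).length) (r c : Nat) :
    pvEntry (pvMSet M (i : Int) (t : Int) v) r c =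
      if r = i ∧ c = t then v else pvEntry M r c := by
  unfold pvMSet pvEntry
  simp only [PySem.List.pyGetD_natCast, PySem.List.pySetD_natCast]
  rw [getD_set_rows]
  by_cases hri : i = r
  · subst hri
    rw [if_pos ⟨rfl, hi⟩, getD_set_cols]
    by_cases hc : c = t
    · subst hc; rw [if_pos ⟨rfl, ht⟩, if_pos ⟨rfl, rfl⟩]
    · rw [if_neg (fun h => hc h.1.symm), if_neg (fun h => hc h.2)]
  · simp [hri]
    intro h; omega

theorem length_getD_pvMSet (M : List (List Int)) (i t : Nat) (v : Int) (r : Nat) :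
    ((pvMSet M (i:Int) (t:Int) v).getD r []).length = (M.getD r []).length := by
  unfold pvMSet
  simp only [PySem.List.pyGetD_natCast, PySem.List.pySetD_natCast]
  rw [getD_set_rows]
  split_ifs with h <;> simp_all

theorem length_pvMSet (M : List (List Int)) (i t : Nat) (v : Int) :
    (pvMSet M (i:Int) (t:Int) v).length = M.length := by
  unfold pvMSet; simp [PySem.List.pySetD_natCast]

-- ----- loop invariant -----

def pvInv (N : Nat) (f : Nat → Nat → Int) (M : List (List Int)) : Prop :=
  M.length = N ∧ (∀ r, r < N → (M.getD r []).length = N) ∧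
  ∀ r c, r < N → c < N → pvEntry M r c = f r c

-- table content after all rows < i are done and row i is done strictly below column t
def pvStage (i t r c : Nat) : Int :=
  if r < i then (pvB r c : Int) else if r = i ∧ c < t then (pvB r c : Int) else 0

-- the inner-loop body of port A, as a named function (definitionally the port's lambda)
def pvBody (i : Int) (m : List (List Int)) (j : Int) : List (List Int) :=
  let left := if i > 0 then pvMGet m (i - 1) j else 0
  let down := if j > 0 then pvMGet m i (j - 1) else 0
  pvMSet m i j (left + down)

def pvOBody (m : List (List Int)) (i : Int) : List (List Int) :=
  (PySem.List.pyRange 0 (i + 1) 1).foldl (pvBody i) m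

theorem pvStep (N i t : Nat) (h1 : 1 ≤ i) (hiN : i < N) (ht : t ≤ i)
    (M : List (List Int)) (hM : pvInv N (pvStage i t) M) :
    pvInv N (pvStage i (t + 1)) (pvBody (i : Int) M (t : Int)) := by
  obtain ⟨hlen, hrows, hval⟩ := hM
  have hiM : i < M.length := by omega
  have htM : t < (M.getD i []).length := by rw [hrows i hiN]; omega
  have hipos : ((i : Int) > 0) := by exact_mod_cast h1
  have hi1 : (i : Int) - 1 = ((i - 1 : Nat) : Int) := by omega
  unfold pvBody
  rw [if_pos hipos, hi1, pvMGet_natCast,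
      hval (i - 1) t (by omega) (by omega),
      show pvStage i t (i - 1) t = (pvB (i - 1) t : Int) from if_pos (by omega)]
  refine ⟨by rw [length_pvMSet]; exact hlen, ?_, ?_⟩
  · intro r hr
    rw [length_getD_pvMSet]; exact hrows r hr
  · intro r c hr hc
    rw [pvEntry_pvMSet M i t hiM _ htM r c]
    by_cases hrc : r = i ∧ c = t
    · rw [if_pos hrc]
      obtain ⟨hru, hcu⟩ := hrc
      subst hru; subst hcu
      have hval' : (pvB (r - 1) c : Int) + (if (c : Int) > 0 then pvMGet M (r : Int) ((c : Int) - 1) else 0)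
          = (pvB r c : Int) := by
        obtain ⟨k, rfl⟩ : ∃ k, r = k + 1 := ⟨r - 1, by omega⟩
        cases c with
        | zero =>
          rw [if_neg (by omega)]
          rw [show pvB (k + 1) 0 = pvB k 0 from by rw [pvB]]
          simp
        | succ s =>
          rw [if_pos (by omega), show ((s + 1 : Nat) : Int) - 1 = ((s : Nat) : Int) from by omega,
              pvMGet_natCast, hval (k + 1) s (by omega) (by omega),
              show pvStage (k + 1) (s + 1) (k + 1) s = (pvB (k + 1) s : Int) from by
                unfold pvStage; rw [if_neg (by omega), if_pos (by omega)]]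
          rw [show pvB (k + 1) (s + 1) = pvB k (s + 1) + pvB (k + 1) s from by
                rw [pvB, if_pos (by omega)]]
          push_cast
          simp
      rw [hval']
      unfold pvStage
      rw [if_neg (by omega), if_pos (by omega)]
    · rw [if_neg hrc]
      rw [hval r c hr hc]
      unfold pvStage
      split_ifs <;> first | rfl | omega

theorem pvInner (N i : Nat) (h1 : 1 ≤ i) (hiN : i < N) :
    ∀ t : Nat, t ≤ i + 1 → ∀ M, pvInv N (pvStage i 0) M →
      pvInv N (pvStage i t) ((PySem.List.pyRange 0 (t : Int) 1).foldl (pvBody (i : Int)) M) := by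
  intro t
  induction t with
  | zero =>
    intro _ M hM
    rw [PySem.List.pyRange_one_eq_nil (by simp)]
    simpa using hM
  | succ t ihr =>
    intro htle M hM
    have h1' : ((t + 1 : Nat) : Int) = (t : Int) + 1 := by push_cast; ring
    rw [h1', PySem.List.pyRange_one_succ_right (by positivity), List.foldl_append]
    simp only [List.foldl_cons, List.foldl_nil]
    exact pvStep N i t h1 hiN (by omega) _ (ihr (by omega) M hM)

theorem pvStage_roll (k : Nat) (r c : Nat) : pvStage k (k + 1) r c = pvStage (k + 1) 0 r c := by
  unfold pvStage
  split_ifs with h h2 h3 h4 h5 <;> try rfl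
  · omega
  · omega
  · -- r = k, ¬ c < k + 1, r < k + 1 : entry is above the diagonal, pvB r c = 0
    rw [pvB_gt (by omega)]; simp
  · omega

theorem pvOuterInv (N : Nat) : ∀ k : Nat, 1 ≤ k → k ≤ N → ∀ M, pvInv N (pvStage 1 0) M →
    pvInv N (pvStage k 0) ((PySem.List.pyRange 1 (k : Int) 1).foldl pvOBody M) := by
  intro k
  induction k with
  | zero => omega
  | succ k ihk =>
    intro _ hkN M hM
    by_cases hk1 : k = 0
    · subst hk1
      rw [PySem.List.pyRange_one_eq_nil (by simp)]
      simpa using hM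
    · have h1' : ((k + 1 : Nat) : Int) = (k : Int) + 1 := by push_cast; ring
      rw [h1', PySem.List.pyRange_one_succ_right (by exact_mod_cast Nat.one_le_iff_ne_zero.mpr hk1),
          List.foldl_append]
      simp only [List.foldl_cons, List.foldl_nil]
      have hmid := ihk (by omega) (by omega) M hM
      have hinner := pvInner N k (by omega) (by omega) (k + 1) (le_refl _) _ hmid
      rw [show ((k + 1 : Nat) : Int) = (k : Int) + 1 from by push_cast; ring] at hinner
      obtain ⟨a, b, c⟩ := hinner
      exact ⟨a, b, fun r c' hr hc => by rw [← pvStage_roll]; exact c r c' hr hc⟩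

-- ----- the initial table -----

theorem pvInit (N : Nat) (hN : 1 ≤ N) : pvInv N (pvStage 1 0)
    (pvMSet ((PySem.List.pyRange 0 (N : Int) 1).map
        (fun _ => (PySem.List.pyRange 0 (N : Int) 1).map (fun _ => (0 : Int))))
      ((0 : Nat) : Int) ((0 : Nat) : Int) 1) := by
  have hlr : (PySem.List.pyRange 0 (N : Int) 1).length = N := by
    rw [PySem.List.length_pyRange_one]; omega
  have hrow : ∀ r : Nat, r < N →
      ((PySem.List.pyRange 0 (N : Int) 1).map
        (fun _ => (PySem.List.pyRange 0 (N : Int) 1).map (fun _ => (0 : Int)))).getD r []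
      = (PySem.List.pyRange 0 (N : Int) 1).map (fun _ => (0 : Int)) := by
    intro r hr
    rw [List.getD_eq_getElem?_getD, List.getElem?_map,
        List.getElem?_eq_getElem (by omega : r < (PySem.List.pyRange 0 (N : Int) 1).length)]
    rfl
  have hrow0 : ∀ c : Nat, c < N →
      ((PySem.List.pyRange 0 (N : Int) 1).map (fun _ => (0 : Int))).getD c 0 = 0 := by
    intro c hc
    rw [List.getD_eq_getElem?_getD, List.getElem?_map,
        List.getElem?_eq_getElem (by omega : c < (PySem.List.pyRange 0 (N : Int) 1).length)]
    rfl
  have hiM : (0 : Nat) < ((PySem.List.pyRange 0 (N : Int) 1).map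
      (fun _ => (PySem.List.pyRange 0 (N : Int) 1).map (fun _ => (0 : Int)))).length := by
    simp [hlr]; omega
  have htM : (0 : Nat) < (((PySem.List.pyRange 0 (N : Int) 1).map
      (fun _ => (PySem.List.pyRange 0 (N : Int) 1).map (fun _ => (0 : Int)))).getD 0 []).length := by
    rw [hrow 0 (by omega)]; simp [hlr]; omega
  refine ⟨by rw [length_pvMSet]; simp [hlr], ?_, ?_⟩
  · intro r hr
    rw [length_getD_pvMSet, hrow r hr]; simp [hlr]
  · intro r c hr hc
    rw [pvEntry_pvMSet _ 0 0 hiM 1 htM r c]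
    unfold pvStage
    by_cases hrc : r = 0 ∧ c = 0
    · rw [if_pos hrc, if_pos (by omega)]
      obtain ⟨h, h'⟩ := hrc; subst h; subst h'
      rw [pvB]; simp
    · rw [if_neg hrc]
      have he : pvEntry ((PySem.List.pyRange 0 (N : Int) 1).map
          (fun _ => (PySem.List.pyRange 0 (N : Int) 1).map (fun _ => (0 : Int)))) r c = 0 := by
        unfold pvEntry
        rw [hrow r hr, hrow0 c hc]
      rw [he]
      split_ifs with h h'
      · have hr0 : r = 0 := by omega
        subst hr0
        rw [pvB_zero c, if_neg (by omega)]; simp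
      · omega
      · rfl

-- ----- port A evaluates to the diagonal of the table -----

theorem pvA_eq (N : Nat) (h3 : 3 ≤ N) :
    num_of_paths_to_dest2 (N : Int) = (pvB (N - 1) (N - 1) : Int) := by
  unfold num_of_paths_to_dest2
  rw [if_neg (by omega), if_neg (by omega)]
  have hinv := pvOuterInv N N (by omega) (le_refl _) _ (pvInit N (by omega))
  obtain ⟨a, b, hval⟩ := hinv
  have hfin := hval (N - 1) (N - 1) (by omega) (by omega)
  rw [show pvStage N 0 (N - 1) (N - 1) = (pvB (N - 1) (N - 1) : Int) from
        if_pos (by omega)] at hfin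
  rw [show (N : Int) - 1 = ((N - 1 : Nat) : Int) from by omega, pvMGet_natCast]
  exact hfin

-- ----- the B-side loop computes binomial coefficients -----

theorem pvAltLoop (m : Nat) : ∀ j : Nat, j ≤ m →
    (PySem.List.pyRange 1 ((j : Int) + 1) 1).foldl
        (fun c k => PySem.Int.floordiv (c * ((m : Int) + k)) k) 1
      = (Nat.choose (m + j) j : ℤ) := by
  intro j
  induction j with
  | zero =>
    intro _
    rw [PySem.List.pyRange_one_eq_nil (by simp)]
    simp
  | succ j ihj =>
    intro hj
    rw [show ((j + 1 : Nat) : Int) + 1 = ((j : Int) + 1) + 1 from by push_cast; ring,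
        PySem.List.pyRange_one_succ_right (by omega), List.foldl_append,
        ihj (by omega)]
    simp only [List.foldl_cons, List.foldl_nil]
    have hnum : (Nat.choose (m + j) j : ℤ) * ((m : Int) + ((j : Int) + 1))
        = ((Nat.choose (m + j + 1) (j + 1) * (j + 1) : Nat) : ℤ) := by
      have := Nat.add_one_mul_choose_eq (m + j) j
      push_cast
      push_cast at this
      linarith
    rw [hnum, show ((j : Int) + 1) = ((j + 1 : Nat) : Int) from by push_cast; ring,
        PySem.Int.floordiv_natCast, Nat.mul_div_cancel _ (by omega),
        show m + (j + 1) = m + j + 1 from by omega]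

-- ----- arithmetic link: C(2m, m) / (m+1) = C(2m, m) - C(2m, m+1) -----

theorem pvChooseLe (m : Nat) : Nat.choose (m + m) (m + 1) ≤ Nat.choose (m + m) m := by
  have := Nat.choose_le_middle (m + 1) (m + m)
  simpa [show (m + m) / 2 = m by omega] using this

theorem pvKey (m : Nat) :
    Nat.choose (m + m) m / (m + 1) = Nat.choose (m + m) m - Nat.choose (m + m) (m + 1) := by
  have h3 : Nat.choose (m + m) (m + 1) * (m + 1) = Nat.choose (m + m) m * m := by
    have := Nat.choose_succ_right_eq (m + m) m
    simpa using this
  have h2 := pvChooseLe m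
  have key : (m + 1) * (Nat.choose (m + m) m - Nat.choose (m + m) (m + 1))
      = Nat.choose (m + m) m := by
    zify [h2]
    have h3' : ((Nat.choose (m + m) (m + 1) : ℤ)) * ((m : ℤ) + 1)
        = (Nat.choose (m + m) m : ℤ) * (m : ℤ) := by exact_mod_cast h3
    linear_combination -h3'
  have hc := Nat.mul_div_cancel_left
    (Nat.choose (m + m) m - Nat.choose (m + m) (m + 1)) (show 0 < m + 1 by omega)
  rw [key] at hc
  exact hc

-- ===== VERDICT (by name: the statement is the Claim_ definition above) =====
theorem num_of_paths_to_dest2_spec : Claim_equal_num_of_paths_to_dest2 := by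
  intro n _ hpre
  unfold Spec_num_of_paths_to_dest2
  have h0 : (0 : Int) ≤ n := hpre
  by_cases hsmall : n < 3
  · have hn : n = 0 ∨ n = 1 ∨ n = 2 := by omega
    rcases hn with h | h | h <;> subst h <;> decide
  · obtain ⟨N, rfl⟩ : ∃ N : Nat, n = (N : Int) := ⟨n.toNat, by omega⟩
    have h3 : 3 ≤ N := by omega
    rw [pvA_eq N h3]
    unfold num_of_paths_to_dest2_alt
    rw [if_neg (by omega), if_neg (by omega)]
    rw [show (N : Int) - 1 = ((N - 1 : Nat) : Int) from by omega]
    simp only []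
    rw [pvAltLoop (N - 1) (N - 1) (le_refl _)]
    rw [show (N : Int) = ((N - 1 + 1 : Nat) : Int) from by omega]
    rw [PySem.Int.floordiv_natCast, pvKey (N - 1)]
    rw [pvB_closed (N - 1) (N - 1) (by omega)]
    rw [Nat.cast_sub (pvChooseLe (N - 1))]
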